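-- pv_equiv track=rewrite | github.com/HOUSSAM16ai/my_ai_project | app/services/chat/graph/nodes/super_reasoner.py | _detect_math_intent
-- ===== SOURCE A (Python) =====
-- def _detect_math_intent(query: str) -> bool:
--     """
--     Simple heuristic to detect if the query requires the Math Reasoning Strategy.
--     """
--     keywords = [
--         "probability",
--         "chance",
--         "odds",
--         "calculate",
--         "solve",
--         "equation",
--         "theorem",
--         "integral",
--         "derivative",
--         "matrix",
--         "urn",
--         "dice",
--         "coin",
--     ]
--     query_lower = query.lower()
--     return any(k in query_lower for k in keywords)
-- ===== SOURCE B (Python) =====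
-- import re
--
-- _MATH_RE = re.compile(
--     "probability|chance|odds|calculate|solve|equation|theorem|"
--     "integral|derivative|matrix|urn|dice|coin"
-- )
--
-- def _detect_math_intent(query: str) -> bool:
--     """
--     Simple heuristic to detect if the query requires the Math Reasoning Strategy.
--     """
--     return bool(_MATH_RE.search(query.lower()))
-- ===== Notes on version B (the rewrite author's own statement) =====
-- stated objective: idiomatic
-- what changed: Replaces the 13 separate substring scans (any k in query.lower()) by one precompiled regex alternation searched in a single left-to-right pass over the lowered query.
import Mathlib
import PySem

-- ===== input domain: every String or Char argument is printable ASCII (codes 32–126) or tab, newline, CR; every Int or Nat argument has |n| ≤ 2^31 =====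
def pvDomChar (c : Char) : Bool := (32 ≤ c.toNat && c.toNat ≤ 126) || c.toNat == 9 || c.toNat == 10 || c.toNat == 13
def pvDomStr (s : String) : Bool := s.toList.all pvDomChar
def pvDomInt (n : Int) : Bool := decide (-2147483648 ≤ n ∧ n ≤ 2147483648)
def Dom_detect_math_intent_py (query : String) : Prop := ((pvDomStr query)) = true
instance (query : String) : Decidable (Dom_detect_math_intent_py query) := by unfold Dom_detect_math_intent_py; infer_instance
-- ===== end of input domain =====

-- B replaces A's 13 separate substring scans by one combined-alternation single left-to-right scan (regex in Python); same result, more idiomatic.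

-- ===== PORT A =====
def pvKeywords : List String :=
  ["probability", "chance", "odds", "calculate", "solve", "equation", "theorem",
   "integral", "derivative", "matrix", "urn", "dice", "coin"]

def detect_math_intent_py (query : String) : Bool :=
  let query_lower := PySem.Str.lower query
  pvKeywords.any (fun k => PySem.Str.isIn k query_lower)

-- ===== PORT B =====
-- the regex alternation's branches, as char lists
def pvAltPats : List (List Char) := pvKeywords.map String.toList

-- one left-to-right pass: at each position try every alternative as a prefix (what
-- re.search of a literal alternation does), then move one char right
def pvReSearch (pats : List (List Char)) : List Char → Bool
  | [] => pats.any (fun p => p.isPrefixOf ([] : List Char))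
  | a :: t =>
    if pats.any (fun p => p.isPrefixOf (a :: t)) then true
    else pvReSearch pats t

def detect_math_intent_py_alt (query : String) : Bool :=
  pvReSearch pvAltPats (PySem.Str.lower query).toList

-- ===== PRECONDITION & SPEC =====
def Spec_detect_math_intent_py (query : String) (out : Bool) : Prop := out = detect_math_intent_py_alt query
instance (query : String) (out : Bool) : Decidable (Spec_detect_math_intent_py query out) := by unfold Spec_detect_math_intent_py; infer_instance

-- ===== CLAIM (what is proved, stated in full; the proofs are below) =====
def Claim_equal_detect_math_intent_py : Prop := ∀ (query : String), Dom_detect_math_intent_py query → Spec_detect_math_intent_py query (detect_math_intent_py query)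

-- ===== LEMMAS AND PROOFS =====

theorem pvReSearch_iff (pats : List (List Char)) (s : List Char) :
    pvReSearch pats s = true ↔ ∃ p ∈ pats, p <:+: s := by
  induction s with
  | nil =>
    simp [pvReSearch, List.any_eq_true, List.isPrefixOf_iff_prefix,
      List.prefix_nil, List.infix_nil]
  | cons a t ih =>
    show (if pats.any (fun p => p.isPrefixOf (a :: t)) then true else pvReSearch pats t) = true ↔ _
    by_cases h : pats.any (fun p => p.isPrefixOf (a :: t)) = true
    · rw [if_pos h]
      refine ⟨fun _ => ?_, fun _ => rfl⟩
      rcases List.any_eq_true.mp h with ⟨p, hp, hpre⟩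
      exact ⟨p, hp, (List.isPrefixOf_iff_prefix.mp hpre).isInfix⟩
    · rw [if_neg h, ih]
      constructor
      · rintro ⟨p, hp, hinf⟩
        exact ⟨p, hp, hinf.trans (List.suffix_cons a t).isInfix⟩
      · rintro ⟨p, hp, hinf⟩
        rcases List.infix_cons_iff.mp hinf with hpre | htail
        · exact absurd (show (pats.any fun p => p.isPrefixOf (a :: t)) = true from
            List.any_eq_true.mpr ⟨p, hp, List.isPrefixOf_iff_prefix.mpr hpre⟩) h
        · exact ⟨p, hp, htail⟩

-- ===== VERDICT (by name: the statement is the Claim_ definition above) =====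
theorem detect_math_intent_py_spec : Claim_equal_detect_math_intent_py := by
  intro query _
  unfold Spec_detect_math_intent_py detect_math_intent_py detect_math_intent_py_alt
  rw [Bool.eq_iff_iff, pvReSearch_iff]
  simp only [List.any_eq_true, PySem.Str.isIn_iff_infix, pvAltPats, List.mem_map]
  constructor
  · rintro ⟨k, hk, hinf⟩; exact ⟨k.toList, ⟨k, hk, rfl⟩, hinf⟩
  · rintro ⟨p, ⟨k, hk, rfl⟩, hinf⟩; exact ⟨k, hk, hinf⟩
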